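-- pv_equiv track=rewrite | github.com/sreelivinglens/lens-league-apex | engine/scoring.py | normalise_genre
-- ===== SOURCE A (Python) =====
-- GENRE_LIST = [
--     {
--         'id':          'Wildlife',
--         'label':       'Wildlife',
--         'description': 'Wildlife, Flora & Fauna — animals, birds, insects, plants, marine life, ecosystems',
--         'aliases':     ['wildlife', 'flora', 'fauna', 'nature', 'animals', 'birds', 'marine', 'underwater'],
--     },
--     {
--         'id':          'Street',
--         'label':       'Street',
--         'description': 'Street — urban life, candid moments, public spaces, architecture details',
--         'aliases':     ['street', 'urban', 'city', 'candid', 'documentary'],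
--     },
--     {
--         'id':          'Landscape',
--         'label':       'Landscape',
--         'description': 'Landscape — natural scenery, seascapes, cityscapes, astrophotography, weather',
--         'aliases':     ['landscape', 'landscapes', 'seascape', 'cityscape', 'astro', 'scenery'],
--     },
--     {
--         'id':          'People',
--         'label':       'People',
--         'description': 'People — portraits, lifestyle, editorial, environmental portraits, cultural',
--         'aliases':     ['people', 'portrait', 'portraits', 'lifestyle', 'editorial', 'cultural'],
--     },
--     {
--         'id':          'Wedding',
--         'label':       'Wedding',
--         'description': 'Wedding — ceremonies, receptions, couples, details, pre-wedding, engagement',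
--         'aliases':     ['wedding', 'bridal', 'ceremony', 'engagement', 'pre-wedding'],
--     },
--     {
--         'id':          'Macro',
--         'label':       'Macro',
--         'description': 'Macro — extreme close-up, textures, patterns, insects at macro scale, product',
--         'aliases':     ['macro', 'closeup', 'close-up', 'texture', 'pattern', 'product'],
--     },
--     {
--         'id':          'Drone & Aerial',
--         'label':       'Drone & Aerial',
--         'description': "Drone & Aerial — aerial photography, drone shots, bird's eye view, elevated perspectives",
--         'aliases':     ['drone', 'aerial', 'drone & aerial', 'birds eye', "bird's eye", 'uav', 'top view'],
--     },
--     {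
--         'id':          'Creative',
--         'label':       'Creative',
--         'description': 'Creative — conceptual, composite, fine art, abstract, experimental photography',
--         'aliases':     ['creative', 'conceptual', 'composite', 'fine art', 'abstract', 'experimental'],
--     },
-- ]
--
-- GENRE_IDS = [g['id'] for g in GENRE_LIST]
--
-- def normalise_genre(raw: str) -> str:
--     """
--     Map a raw genre string (from DB, form, or legacy data) to a canonical GENRE_IDS entry.
--     Handles legacy renames: 'Landscapes' → 'Landscape', 'Drone' → 'Drone & Aerial'.
--     Falls back to 'Wildlife' if no match found.
--     """
--     if not raw:
--         return 'Wildlife'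
--     clean = raw.strip()
--     # Exact match first
--     if clean in GENRE_IDS:
--         return clean
--     # Legacy renames
--     legacy = {
--         'Landscapes': 'Landscape',
--         'Drone':      'Drone & Aerial',
--     }
--     if clean in legacy:
--         return legacy[clean]
--     # Alias scan (case-insensitive)
--     lower = clean.lower()
--     for g in GENRE_LIST:
--         if lower in g['aliases']:
--             return g['id']
--     return 'Wildlife'
-- ===== SOURCE B (Python) =====
-- # B: one flat case-insensitive alias table, bucketed by first character, replacing
-- # A's exact/legacy/alias cascade with a single bucket scan.
-- _GENRES = [
--     ('Wildlife', ['wildlife', 'flora', 'fauna', 'nature', 'animals', 'birds', 'marine', 'underwater']),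
--     ('Street', ['street', 'urban', 'city', 'candid', 'documentary']),
--     ('Landscape', ['landscape', 'landscapes', 'seascape', 'cityscape', 'astro', 'scenery']),
--     ('People', ['people', 'portrait', 'portraits', 'lifestyle', 'editorial', 'cultural']),
--     ('Wedding', ['wedding', 'bridal', 'ceremony', 'engagement', 'pre-wedding']),
--     ('Macro', ['macro', 'closeup', 'close-up', 'texture', 'pattern', 'product']),
--     ('Drone & Aerial', ['drone', 'aerial', 'drone & aerial', 'birds eye', "bird's eye", 'uav', 'top view']),
--     ('Creative', ['creative', 'conceptual', 'composite', 'fine art', 'abstract', 'experimental']),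
-- ]
--
-- # buckets: first character -> list of (alias, id); built once at import time.
-- _BUCKETS = {}
-- for _gid, _aliases in _GENRES:
--     for _a in _aliases:
--         _BUCKETS.setdefault(_a[:1], []).append((_a, _gid))
--
-- def normalise_genre(raw: str) -> str:
--     if not raw:
--         return 'Wildlife'
--     key = raw.strip().lower()
--     for alias, gid in _BUCKETS.get(key[:1], ()):
--         if alias == key:
--             return gid
--     return 'Wildlife'
-- ===== Notes on version B (the rewrite author's own statement) =====
-- stated objective: alternative
-- what changed: Replaces A's three-stage cascade (case-sensitive exact id match, legacy-rename dict, then a scan over all genres' alias lists) with one flat case-insensitive alias->id table bucketed by first character and built once at import time; the function lowercases the key, picks the bucket for its first character and scans only that small bucket; valid because every id's lowercase and both legacy keys' lowercase are already aliases and all 49 aliases are pairwise distinct.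
import Mathlib
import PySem

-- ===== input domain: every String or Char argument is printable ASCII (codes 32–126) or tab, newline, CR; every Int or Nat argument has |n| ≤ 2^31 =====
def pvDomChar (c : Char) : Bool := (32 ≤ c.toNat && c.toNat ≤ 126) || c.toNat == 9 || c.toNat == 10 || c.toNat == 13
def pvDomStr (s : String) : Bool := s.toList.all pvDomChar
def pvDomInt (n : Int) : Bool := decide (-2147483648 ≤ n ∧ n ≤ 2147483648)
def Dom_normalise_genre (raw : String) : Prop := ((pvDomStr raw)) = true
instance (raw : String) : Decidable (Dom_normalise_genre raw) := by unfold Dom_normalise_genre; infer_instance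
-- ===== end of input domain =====

-- B replaces A's exact-id / legacy-rename / per-genre alias cascade by one flat
-- case-insensitive alias table bucketed by first character (objective: simpler lookup).

-- ===== PORT A =====
-- GENRE_LIST as (id, label, description, aliases); label/description are carried but unused.
def GENRE_LIST : List (String × String × String × List String) :=
  [ ("Wildlife", "Wildlife", "Wildlife, Flora & Fauna — animals, birds, insects, plants, marine life, ecosystems",
      ["wildlife", "flora", "fauna", "nature", "animals", "birds", "marine", "underwater"]),
    ("Street", "Street", "Street — urban life, candid moments, public spaces, architecture details",
      ["street", "urban", "city", "candid", "documentary"]),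
    ("Landscape", "Landscape", "Landscape — natural scenery, seascapes, cityscapes, astrophotography, weather",
      ["landscape", "landscapes", "seascape", "cityscape", "astro", "scenery"]),
    ("People", "People", "People — portraits, lifestyle, editorial, environmental portraits, cultural",
      ["people", "portrait", "portraits", "lifestyle", "editorial", "cultural"]),
    ("Wedding", "Wedding", "Wedding — ceremonies, receptions, couples, details, pre-wedding, engagement",
      ["wedding", "bridal", "ceremony", "engagement", "pre-wedding"]),
    ("Macro", "Macro", "Macro — extreme close-up, textures, patterns, insects at macro scale, product",
      ["macro", "closeup", "close-up", "texture", "pattern", "product"]),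
    ("Drone & Aerial", "Drone & Aerial", "Drone & Aerial — aerial photography, drone shots, bird's eye view, elevated perspectives",
      ["drone", "aerial", "drone & aerial", "birds eye", "bird's eye", "uav", "top view"]),
    ("Creative", "Creative", "Creative — conceptual, composite, fine art, abstract, experimental photography",
      ["creative", "conceptual", "composite", "fine art", "abstract", "experimental"]) ]

def GENRE_IDS : List String := GENRE_LIST.map (·.1)

-- the `for g in GENRE_LIST: if lower in g['aliases']: return g['id']` loop + final fallback
def aliasScan (gs : List (String × String × String × List String)) (lower : String) : String :=
  match gs with
  | [] => "Wildlife"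
  | g :: rest => if lower ∈ g.2.2.2 then g.1 else aliasScan rest lower

def normalise_genre (raw : String) : String :=
  if raw = "" then "Wildlife"
  else
    let clean := PySem.Str.strip raw
    if clean ∈ GENRE_IDS then clean
    else
      let legacy : PySem.Dict String String :=
        PySem.Dict.ofList [("Landscapes", "Landscape"), ("Drone", "Drone & Aerial")]
      match legacy.get? clean with          -- `if clean in legacy: return legacy[clean]`
      | some v => v
      | none => aliasScan GENRE_LIST (PySem.Str.lower clean)

-- ===== PORT B =====
def B_GENRES : List (String × List String) :=
  [ ("Wildlife", ["wildlife", "flora", "fauna", "nature", "animals", "birds", "marine", "underwater"]),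
    ("Street", ["street", "urban", "city", "candid", "documentary"]),
    ("Landscape", ["landscape", "landscapes", "seascape", "cityscape", "astro", "scenery"]),
    ("People", ["people", "portrait", "portraits", "lifestyle", "editorial", "cultural"]),
    ("Wedding", ["wedding", "bridal", "ceremony", "engagement", "pre-wedding"]),
    ("Macro", ["macro", "closeup", "close-up", "texture", "pattern", "product"]),
    ("Drone & Aerial", ["drone", "aerial", "drone & aerial", "birds eye", "bird's eye", "uav", "top view"]),
    ("Creative", ["creative", "conceptual", "composite", "fine art", "abstract", "experimental"]) ]

-- _BUCKETS: first character -> list of (alias, id), built by the import-time double loop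
-- (`setdefault(a[:1], []).append((a, gid))` = read current bucket, re-insert it extended).
def bBuckets : PySem.Dict String (List (String × String)) :=
  B_GENRES.foldl
    (fun d g => g.2.foldl
      (fun d a =>
        d.insert (PySem.Str.slice a none (some 1))
          (d.getD (PySem.Str.slice a none (some 1)) [] ++ [(a, g.1)])) d)
    PySem.Dict.empty

-- the `for alias, gid in bucket: if alias == key: return gid` loop + fallback
def scanBucket (bucket : List (String × String)) (key : String) : String :=
  match bucket with
  | [] => "Wildlife"
  | (al, gid) :: rest => if al = key then gid else scanBucket rest key

def normalise_genre_alt (raw : String) : String :=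
  if raw = "" then "Wildlife"
  else
    let key := PySem.Str.lower (PySem.Str.strip raw)
    scanBucket (bBuckets.getD (PySem.Str.slice key none (some 1)) []) key

-- ===== PRECONDITION & SPEC =====
def Spec_normalise_genre (raw : String) (out : String) : Prop := out = normalise_genre_alt raw
instance (raw : String) (out : String) : Decidable (Spec_normalise_genre raw out) := by unfold Spec_normalise_genre; infer_instance

-- ===== CLAIM (what is proved, stated in full; the proofs are below) =====
def Claim_equal_normalise_genre : Prop := ∀ (raw : String), Dom_normalise_genre raw → Spec_normalise_genre raw (normalise_genre raw)

-- ===== LEMMAS AND PROOFS =====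

-- the flat association list of all (alias, id) pairs, in A's scan order
def flatAliases (gs : List (String × String × String × List String)) : List (String × String) :=
  gs.flatMap (fun g => g.2.2.2.map (fun a => (a, g.1)))

lemma scanBucket_map_append (as : List String) (id l : String) (rest : List (String × String)) :
    scanBucket (as.map (fun a => (a, id)) ++ rest) l =
      if l ∈ as then id else scanBucket rest l := by
  induction as with
  | nil => simp
  | cons a as ih =>
      simp only [List.map_cons, List.cons_append, scanBucket, List.mem_cons]
      by_cases h : a = l
      · simp [h]
      · simp [h, Ne.symm h, ih]

-- A's alias-scan loop is a first-match lookup in the flattened pair list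
lemma aliasScan_eq_scanFlat (gs : List (String × String × String × List String)) (l : String) :
    aliasScan gs l = scanBucket (flatAliases gs) l := by
  induction gs with
  | nil => simp [aliasScan, flatAliases, scanBucket]
  | cons g rest ih =>
      simp only [aliasScan, flatAliases, List.flatMap_cons, scanBucket_map_append]
      by_cases h : l ∈ g.2.2.2 <;> simp [h, ih, flatAliases]

-- dropping pairs whose key cannot be l does not change a first-match lookup
lemma scanBucket_filter (p : String × String → Bool) (xs : List (String × String)) (l : String)
    (h : ∀ kv ∈ xs, kv.1 = l → p kv = true) :
    scanBucket (xs.filter p) l = scanBucket xs l := by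
  induction xs with
  | nil => rfl
  | cons kv rest ih =>
      have hrest : ∀ kv' ∈ rest, kv'.1 = l → p kv' = true := fun kv' hm => h kv' (by simp [hm])
      by_cases hp : p kv = true
      · obtain ⟨a, g⟩ := kv
        simp only [List.filter_cons, hp, if_pos, scanBucket]
        by_cases he : a = l <;> simp [he, ih hrest]
      · have hne : kv.1 ≠ l := fun he => hp (h kv (by simp) he)
        obtain ⟨a, g⟩ := kv
        simp only [List.filter_cons, hp, if_neg, Bool.false_eq_true, not_false_iff, scanBucket]
        simp only [if_neg hne, ih hrest]

def firstChar (s : String) : String := PySem.Str.slice s none (some 1)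

-- every alias in the table starts with one of these characters
def presentKeys : List String :=
  ["w", "f", "n", "a", "b", "m", "u", "s", "c", "d", "l", "p", "e", "t"]

lemma flat_firsts : ∀ kv ∈ flatAliases GENRE_LIST, firstChar kv.1 ∈ presentKeys := by decide

set_option maxRecDepth 40000 in
lemma bBuckets_eq : bBuckets = PySem.Dict.mk
    [ ("w", [("wildlife", "Wildlife"), ("wedding", "Wedding")]),
      ("f", [("flora", "Wildlife"), ("fauna", "Wildlife"), ("fine art", "Creative")]),
      ("n", [("nature", "Wildlife")]),
      ("a", [("animals", "Wildlife"), ("astro", "Landscape"), ("aerial", "Drone & Aerial"), ("abstract", "Creative")]),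
      ("b", [("birds", "Wildlife"), ("bridal", "Wedding"), ("birds eye", "Drone & Aerial"), ("bird's eye", "Drone & Aerial")]),
      ("m", [("marine", "Wildlife"), ("macro", "Macro")]),
      ("u", [("underwater", "Wildlife"), ("urban", "Street"), ("uav", "Drone & Aerial")]),
      ("s", [("street", "Street"), ("seascape", "Landscape"), ("scenery", "Landscape")]),
      ("c", [("city", "Street"), ("candid", "Street"), ("cityscape", "Landscape"), ("cultural", "People"), ("ceremony", "Wedding"), ("closeup", "Macro"), ("close-up", "Macro"), ("creative", "Creative"), ("conceptual", "Creative"), ("composite", "Creative")]),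
      ("d", [("documentary", "Street"), ("drone", "Drone & Aerial"), ("drone & aerial", "Drone & Aerial")]),
      ("l", [("landscape", "Landscape"), ("landscapes", "Landscape"), ("lifestyle", "People")]),
      ("p", [("people", "People"), ("portrait", "People"), ("portraits", "People"), ("pre-wedding", "Wedding"), ("pattern", "Macro"), ("product", "Macro")]),
      ("e", [("editorial", "People"), ("engagement", "Wedding"), ("experimental", "Creative")]),
      ("t", [("texture", "Macro"), ("top view", "Drone & Aerial")]) ] := by decide

-- each bucket is exactly the flat table filtered to its first character
set_option maxRecDepth 40000 in
set_option maxHeartbeats 2000000 in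
lemma bucket_eq_filter (c : String) :
    bBuckets.getD c [] = (flatAliases GENRE_LIST).filter (fun kv => firstChar kv.1 == c) := by
  by_cases h1 : c = "w";  · subst h1; rw [bBuckets_eq]; decide
  by_cases h2 : c = "f";  · subst h2; rw [bBuckets_eq]; decide
  by_cases h3 : c = "n";  · subst h3; rw [bBuckets_eq]; decide
  by_cases h4 : c = "a";  · subst h4; rw [bBuckets_eq]; decide
  by_cases h5 : c = "b";  · subst h5; rw [bBuckets_eq]; decide
  by_cases h6 : c = "m";  · subst h6; rw [bBuckets_eq]; decide
  by_cases h7 : c = "u";  · subst h7; rw [bBuckets_eq]; decide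
  by_cases h8 : c = "s";  · subst h8; rw [bBuckets_eq]; decide
  by_cases h9 : c = "c";  · subst h9; rw [bBuckets_eq]; decide
  by_cases h10 : c = "d"; · subst h10; rw [bBuckets_eq]; decide
  by_cases h11 : c = "l"; · subst h11; rw [bBuckets_eq]; decide
  by_cases h12 : c = "p"; · subst h12; rw [bBuckets_eq]; decide
  by_cases h13 : c = "e"; · subst h13; rw [bBuckets_eq]; decide
  by_cases h14 : c = "t"; · subst h14; rw [bBuckets_eq]; decide
  have hc : c ∉ presentKeys := by
    simp [presentKeys, h1, h2, h3, h4, h5, h6, h7, h8, h9, h10, h11, h12, h13, h14]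
  have hfil : (flatAliases GENRE_LIST).filter (fun kv => firstChar kv.1 == c) = [] := by
    rw [List.filter_eq_nil_iff]
    intro kv hm hp
    have he : firstChar kv.1 = c := by simpa using hp
    exact hc (he ▸ flat_firsts kv hm)
  have hget : (bBuckets.get? c) = none := by
    rw [bBuckets_eq]
    simp [PySem.Dict.get?,
      show ("w" == c) = false by simp [Ne.symm h1],
      show ("f" == c) = false by simp [Ne.symm h2],
      show ("n" == c) = false by simp [Ne.symm h3],
      show ("a" == c) = false by simp [Ne.symm h4],
      show ("b" == c) = false by simp [Ne.symm h5],
      show ("m" == c) = false by simp [Ne.symm h6],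
      show ("u" == c) = false by simp [Ne.symm h7],
      show ("s" == c) = false by simp [Ne.symm h8],
      show ("c" == c) = false by simp [Ne.symm h9],
      show ("d" == c) = false by simp [Ne.symm h10],
      show ("l" == c) = false by simp [Ne.symm h11],
      show ("p" == c) = false by simp [Ne.symm h12],
      show ("e" == c) = false by simp [Ne.symm h13],
      show ("t" == c) = false by simp [Ne.symm h14]]
  rw [hfil, PySem.Dict.getD_eq_get?_getD, hget]; rfl

-- the whole alias scan equals B's bucket lookup, for every key
lemma scan_eq_bucket (key : String) :
    aliasScan GENRE_LIST key = scanBucket (bBuckets.getD (firstChar key) []) key := by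
  rw [aliasScan_eq_scanFlat, bucket_eq_filter]
  exact (scanBucket_filter _ _ _ (fun kv _ hk => by simp [hk])).symm

-- the cascade body agrees with B's body for every cleaned string
set_option maxRecDepth 40000 in
set_option maxHeartbeats 2000000 in
lemma core (clean : String) :
    (if clean ∈ GENRE_IDS then clean
     else
       match (PySem.Dict.ofList [("Landscapes", "Landscape"), ("Drone", "Drone & Aerial")] :
           PySem.Dict String String).get? clean with
       | some v => v
       | none => aliasScan GENRE_LIST (PySem.Str.lower clean)) =
    scanBucket (bBuckets.getD (firstChar (PySem.Str.lower clean)) []) (PySem.Str.lower clean) := by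
  by_cases h1 : clean = "Wildlife";   · subst h1; rw [← scan_eq_bucket]; decide
  by_cases h2 : clean = "Street";     · subst h2; rw [← scan_eq_bucket]; decide
  by_cases h3 : clean = "Landscape";  · subst h3; rw [← scan_eq_bucket]; decide
  by_cases h4 : clean = "People";     · subst h4; rw [← scan_eq_bucket]; decide
  by_cases h5 : clean = "Wedding";    · subst h5; rw [← scan_eq_bucket]; decide
  by_cases h6 : clean = "Macro";      · subst h6; rw [← scan_eq_bucket]; decide
  by_cases h7 : clean = "Drone & Aerial"; · subst h7; rw [← scan_eq_bucket]; decide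
  by_cases h8 : clean = "Creative";   · subst h8; rw [← scan_eq_bucket]; decide
  by_cases h9 : clean = "Landscapes"; · subst h9; rw [← scan_eq_bucket]; decide
  by_cases h10 : clean = "Drone";     · subst h10; rw [← scan_eq_bucket]; decide
  have hids : clean ∉ GENRE_IDS := by
    simp [GENRE_IDS, GENRE_LIST, h1, h2, h3, h4, h5, h6, h7, h8]
  have hleg : (PySem.Dict.ofList [("Landscapes", "Landscape"), ("Drone", "Drone & Aerial")] :
      PySem.Dict String String).get? clean = none := by
    have e : (PySem.Dict.ofList [("Landscapes", "Landscape"), ("Drone", "Drone & Aerial")] :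
        PySem.Dict String String) = PySem.Dict.mk [("Landscapes", "Landscape"), ("Drone", "Drone & Aerial")] := by
      decide
    rw [e]
    simp [PySem.Dict.get?,
      show ("Landscapes" == clean) = false by simp [Ne.symm h9],
      show ("Drone" == clean) = false by simp [Ne.symm h10]]
  simp only [if_neg hids, hleg]
  exact scan_eq_bucket (PySem.Str.lower clean)

-- ===== VERDICT (by name: the statement is the Claim_ definition above) =====
theorem normalise_genre_spec : Claim_equal_normalise_genre := by
  intro raw _
  unfold Spec_normalise_genre normalise_genre normalise_genre_alt
  by_cases hr : raw = ""
  · simp [hr]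
  · simp only [if_neg hr]
    exact core (PySem.Str.strip raw)
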